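-- pv_equiv track=rewrite | github.com/simontonner/neural-quantum-tomo | experiments_merge/playground/training_loader_adapter.py | _infer_basis_order
-- ===== SOURCE A (Python) =====
-- from typing import Iterable, List, Tuple, Optional
-- from typing import Iterable, List, Tuple, Optional
--
-- def _infer_basis_order(codes_sorted: List[str], nqubits: int) -> List[str]:
--     """
--     Canonical order (matching generator):
--       Z^N,
--       sliding 'XX' over Z,
--       sliding 'XY' over Z,
--       then any remaining codes in sorted order.
--     """
--     codes_set = set(codes_sorted)
--     order: List[str] = []
--
--     z_code = "Z" * nqubits
--     if z_code in codes_set: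
--         order.append(z_code)
--
--     for w in [("X", "X"), ("X", "Y")]:
--         for b in _sliding_window_bases(w, nqubits, background="Z"):
--             if b in codes_set and b not in order:
--                 order.append(b)
--
--     for c in codes_sorted:
--         if c not in order:
--             order.append(c)
--
--     return order
--
-- def _sliding_window_bases(window: Tuple[str, ...], num_qubits: int, background: str = "Z") -> List[str]:
--     """Slide `window` over a `background` string, return codes as strings."""
--     w = list(window)
--     L = len(w)
--     if L == 0 or L > num_qubits:
--         return []
--     out = []
--     for i in range(0, num_qubits - L + 1):
--         b = [background] * num_qubits
--         b[i:i + L] = w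
--         out.append("".join(b))
--     return out
-- ===== SOURCE B (Python) =====
-- from typing import List, Tuple
--
--
-- def _sliding_window_bases(window: Tuple[str, ...], num_qubits: int, background: str = "Z") -> List[str]:
--     """Slide `window` over a `background` string, return codes as strings."""
--     w = list(window)
--     L = len(w)
--     if L == 0 or L > num_qubits:
--         return []
--     out = []
--     for i in range(0, num_qubits - L + 1):
--         b = [background] * num_qubits
--         b[i:i + L] = w
--         out.append("".join(b))
--     return out
--
--
-- def _infer_basis_order(codes_sorted: List[str], nqubits: int) -> List[str]:
--     # Rank-table-then-stable-sort strategy: assign every canonical code an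
--     # integer rank, deduplicate the input keeping first occurrences, and sort
--     # the index-decorated codes by (rank, original position) — unknown codes
--     # get rank len(rank) and so keep their input order after all canonicals.
--     canon = ["Z" * nqubits]
--     for w in [("X", "X"), ("X", "Y")]:
--         canon += _sliding_window_bases(w, nqubits, background="Z")
--     rank = {b: i for i, b in enumerate(canon)}
--     big = len(rank)
--     deduped = list(dict.fromkeys(codes_sorted))
--     decorated = sorted(enumerate(deduped), key=lambda t: (rank.get(t[1], big), t[0]))
--     return [c for _, c in decorated]
-- ===== Notes on version B (the rewrite author's own statement) =====
-- stated objective: alternative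
-- what changed: B replaces A's incremental generate-candidate/membership-test/append construction by a rank-table-then-stable-sort strategy: it assigns each canonical code an integer rank in a dict, deduplicates the input keeping first occurrences, and sorts the index-decorated codes by (rank, original position).
import Mathlib
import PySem

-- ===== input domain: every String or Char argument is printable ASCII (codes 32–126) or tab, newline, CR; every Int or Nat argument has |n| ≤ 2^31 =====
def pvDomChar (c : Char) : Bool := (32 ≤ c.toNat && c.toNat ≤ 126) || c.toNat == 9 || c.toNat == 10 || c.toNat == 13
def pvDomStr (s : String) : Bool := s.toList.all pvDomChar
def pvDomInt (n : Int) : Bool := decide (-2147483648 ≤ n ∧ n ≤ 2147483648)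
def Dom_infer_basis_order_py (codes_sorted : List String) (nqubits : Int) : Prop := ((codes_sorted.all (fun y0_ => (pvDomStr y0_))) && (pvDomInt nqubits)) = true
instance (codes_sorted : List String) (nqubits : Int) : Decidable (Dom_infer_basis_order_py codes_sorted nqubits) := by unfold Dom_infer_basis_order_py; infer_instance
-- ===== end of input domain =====

-- B replaces A's incremental membership-test-and-append construction by a rank table over the
-- canonical codes and one stable sort of the index-decorated deduplicated input; objective: alternative.

-- ===== PORT A =====
-- shared module helper _sliding_window_bases (used by both Pythons)
def sliding_window_bases (window : List String) (num_qubits : Int) (background : String) : List String :=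
  let w := window
  let L : Int := (w.length : Int)
  if L == 0 || decide (num_qubits < L) then []
  else
    (PySem.List.pyRange 0 (num_qubits - L + 1) 1).foldl
      (fun out i =>
        let b := PySem.List.pyRepeat [background] num_qubits
        -- slice assignment b[i:i+L] = w : exact as take/++/drop since here 0 ≤ i and i + L ≤ num_qubits
        let b2 := b.take i.toNat ++ w ++ b.drop (i + L).toNat
        out ++ [PySem.Str.join "" b2]) []

def infer_basis_order_py (codes_sorted : List String) (nqubits : Int) : List String :=
  let codes_set : PySem.Set String := PySem.Set.ofList codes_sorted
  let order : List String := []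
  -- "Z" * nqubits (string repetition; a non-positive count gives "")
  let z_code : String := String.ofList (PySem.List.pyRepeat ['Z'] nqubits)
  let order := if PySem.Set.contains codes_set z_code then order ++ [z_code] else order
  let order := [["X", "X"], ["X", "Y"]].foldl
      (fun order w =>
        (sliding_window_bases w nqubits "Z").foldl
          (fun order b =>
            if PySem.Set.contains codes_set b && !(order.contains b) then order ++ [b] else order)
          order)
      order
  codes_sorted.foldl (fun order c => if !(order.contains c) then order ++ [c] else order) order

-- ===== PORT B =====
def infer_basis_order_py_alt (codes_sorted : List String) (nqubits : Int) : List String :=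
  let canon : List String := [String.ofList (PySem.List.pyRepeat ['Z'] nqubits)]
  let canon := [["X", "X"], ["X", "Y"]].foldl
      (fun canon w => canon ++ sliding_window_bases w nqubits "Z") canon
  -- rank = {b: i for i, b in enumerate(canon)}
  let rank : PySem.Dict String Int :=
    (PySem.List.enumerate canon).foldl (fun d p => d.insert p.2 p.1) PySem.Dict.empty
  let big : Int := (PySem.Dict.size rank : Int)
  let deduped := PySem.List.dedup codes_sorted
  let decorated := PySem.List.sorted2 (PySem.List.enumerate deduped)
      (fun t => rank.getD t.2 big) (fun t => t.1) false
  decorated.map (fun t => t.2)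

-- ===== PRECONDITION & SPEC =====
def Spec_infer_basis_order_py (codes_sorted : List String) (nqubits : Int) (out : List String) : Prop := out = infer_basis_order_py_alt codes_sorted nqubits
instance (codes_sorted : List String) (nqubits : Int) (out : List String) : Decidable (Spec_infer_basis_order_py codes_sorted nqubits out) := by unfold Spec_infer_basis_order_py; infer_instance

-- ===== CLAIM (what is proved, stated in full; the proofs are below) =====
def Claim_equal_infer_basis_order_py : Prop := ∀ (codes_sorted : List String) (nqubits : Int), Dom_infer_basis_order_py codes_sorted nqubits → Spec_infer_basis_order_py codes_sorted nqubits (infer_basis_order_py codes_sorted nqubits)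

-- ===== LEMMAS AND PROOFS =====

-- A's canonical loop with a growing-list membership test is a filter, provided the
-- candidates are distinct and disjoint from what is already in the accumulator.
theorem loop_filter (P : String → Bool) :
    ∀ (bs acc : List String), bs.Nodup → (∀ b ∈ bs, b ∉ acc) →
    bs.foldl (fun o b => if P b && !(o.contains b) then o ++ [b] else o) acc
      = acc ++ bs.filter P := by
  intro bs
  induction bs with
  | nil => intro acc _ _; simp
  | cons b bs ih =>
    intro acc hnd hdis
    have hb : b ∉ acc := hdis b (by simp)
    have hbc : acc.contains b = false := by
      simp [hb]
    rw [List.foldl_cons]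
    cases hP : P b with
    | false =>
      simp only [Bool.false_and, Bool.false_eq_true, if_false]
      rw [ih acc hnd.of_cons (fun x hx => hdis x (by simp [hx]))]
      simp [hP]
    | true =>
      rw [hbc]
      simp only [Bool.not_false, Bool.and_self, if_true]
      rw [ih (acc ++ [b]) hnd.of_cons ?_]
      · simp [hP]
      · intro x hx
        have hxb : x ≠ b := by
          intro h; subst h; exact (List.nodup_cons.mp hnd).1 hx
        simp [hxb, fun h => hdis x (by simp [hx]) h]

-- A's final loop is exactly set-style appending, i.e. Set.update.
theorem loop_update (xs acc : List String) :
    xs.foldl (fun o c => if !(o.contains c) then o ++ [c] else o) acc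
      = PySem.Set.update acc xs := by
  have hfun : (fun (o : List String) c => if !(o.contains c) then o ++ [c] else o)
      = fun o c => PySem.Set.add o c := by
    funext o c
    cases h : o.contains c <;>
      simp_all [PySem.Set.add, PySem.Set.contains_eq_listContains]
  rw [hfun]
  rfl

-- the window string with the window at offset k (as a character list)
theorem pat_ne {c1 c2 d1 d2 : Char} (hc : c1 ≠ 'Z') {k l r1 r2 : Nat} (hkl : k < l) :
    List.replicate k 'Z' ++ [c1, c2] ++ List.replicate r1 'Z'
      ≠ List.replicate l 'Z' ++ [d1, d2] ++ List.replicate r2 'Z' := by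
  intro h
  have h' := congrArg (fun t => t[k]?) h
  simp only [List.append_assoc, List.getElem?_append, List.length_replicate,
    List.getElem?_replicate, Nat.lt_irrefl, Nat.sub_self, hkl] at h'
  simp at h'
  exact hc h'

theorem join_toList (k r : Nat) (c1 c2 : Char) (w1 w2 : String)
    (h1 : w1.toList = [c1]) (h2 : w2.toList = [c2]) :
    (PySem.Str.join "" (List.replicate k "Z" ++ [w1, w2] ++ List.replicate r "Z")).toList
      = List.replicate k 'Z' ++ [c1, c2] ++ List.replicate r 'Z' := by
  rw [PySem.Str.toList_join]
  have hmap : List.map String.toList (List.replicate k "Z" ++ [w1, w2] ++ List.replicate r "Z")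
      = List.map (fun c => [c]) (List.replicate k 'Z' ++ [c1, c2] ++ List.replicate r 'Z') := by
    simp [List.map_append, List.map_replicate, h1, h2]
  rw [hmap]
  have hsep : ("" : String).toList = [] := rfl
  rw [hsep, PySem.Chars.join_nil_singletons]

-- closed form of the shared helper for a 2-character window, when it is non-empty
theorem swb_eq (w1 w2 : String) (n : Int) (h2 : 2 ≤ n) :
    sliding_window_bases [w1, w2] n "Z"
      = (List.range (n.toNat - 1)).map (fun k =>
          PySem.Str.join "" (List.replicate k "Z" ++ [w1, w2] ++ List.replicate (n.toNat - (k + 2)) "Z")) := by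
  unfold sliding_window_bases
  rw [if_neg (by simp; omega)]
  have hn1 : n - (([w1, w2] : List String).length : Int) + 1 = ((n.toNat - 1 : Nat) : Int) := by
    simp; omega
  rw [hn1, PySem.List.pyRange_zero_natCast, List.foldl_map,
    PySem.List.foldl_append_singleton_eq_map]
  simp only [List.nil_append]
  apply List.map_congr_left
  intro k hk
  have hk' : k < n.toNat - 1 := List.mem_range.mp hk
  simp only [PySem.List.pyRepeat_singleton]
  have ht1 : ((k : Int)).toNat = k := Int.toNat_natCast k
  have ht2 : ((k : Int) + (([w1, w2] : List String).length : Int)).toNat = k + 2 := by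
    omega
  rw [ht1, ht2, List.take_replicate, List.drop_replicate]
  have hmin : min k n.toNat = k := by omega
  rw [hmin]

theorem swb_nil (w1 w2 : String) (n : Int) (h2 : n < 2) :
    sliding_window_bases [w1, w2] n "Z" = [] := by
  unfold sliding_window_bases
  rw [if_pos]
  simp
  omega

theorem z_toList (n : Int) :
    (String.ofList (PySem.List.pyRepeat ['Z'] n)).toList = List.replicate n.toNat 'Z' := by
  rw [PySem.List.pyRepeat_singleton]
  exact String.toList_ofList

-- membership of a character in a window string
theorem mem_of_mem_swb (c1 c2 : Char) (w1 w2 : String)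
    (h1 : w1.toList = [c1]) (h2 : w2.toList = [c2]) (n : Int) (b : String)
    (hb : b ∈ sliding_window_bases [w1, w2] n "Z") :
    ∃ k, b.toList = List.replicate k 'Z' ++ [c1, c2] ++ List.replicate (n.toNat - (k + 2)) 'Z' := by
  by_cases hn : 2 ≤ n
  · rw [swb_eq w1 w2 n hn] at hb
    obtain ⟨k, _, rfl⟩ := List.mem_map.mp hb
    exact ⟨k, join_toList _ _ c1 c2 w1 w2 h1 h2⟩
  · rw [swb_nil w1 w2 n (by omega)] at hb
    simp at hb

theorem swb_nodup (c1 c2 : Char) (hc : c1 ≠ 'Z') (w1 w2 : String)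
    (h1 : w1.toList = [c1]) (h2 : w2.toList = [c2]) (n : Int) :
    (sliding_window_bases [w1, w2] n "Z").Nodup := by
  by_cases hn : 2 ≤ n
  · rw [swb_eq w1 w2 n hn]
    refine List.Nodup.map_on ?_ (List.nodup_range)
    intro k _ l _ heq
    by_contra hkl
    have := congrArg String.toList heq
    rw [join_toList _ _ c1 c2 w1 w2 h1 h2, join_toList _ _ c1 c2 w1 w2 h1 h2] at this
    rcases Nat.lt_or_ge k l with h | h
    · exact pat_ne hc h this
    · exact pat_ne hc (by omega) this.symm
  · rw [swb_nil w1 w2 n (by omega)]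
    exact List.nodup_nil

-- B's sorted2 with two integer key components is sorted with the lexicographic key.
theorem sorted2_eq_sorted_lex {α : Type} (xs : List α) (k1 k2 : α → Int) :
    PySem.List.sorted2 xs k1 k2 false
      = PySem.List.sorted xs (fun x => toLex (k1 x, k2 x)) false := by
  rw [PySem.List.sorted_eq_foldl_insertBy]
  show List.foldl (fun acc x => PySem.List.insertBy _ x acc) [] xs = _
  congr 1
  funext acc x
  congr 1
  funext a b
  rw [Bool.eq_iff_iff]
  simp only [Bool.false_eq_true, if_false, Bool.or_eq_true, Bool.and_eq_true, Bool.not_eq_eq_eq_not, Bool.not_true,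
    decide_eq_true_eq, decide_eq_false_iff_not, Prod.Lex.lt_iff, ofLex_toLex]
  omega

-- map of snd over a filterMap whose values carry their source in the second component
theorem filterMap_map_snd (f : String → Option (Int × String)) (P : String → Bool)
    (hf : ∀ b, if P b then (∃ t, f b = some t ∧ t.2 = b) else f b = none) :
    ∀ l : List String, ((l.filterMap f).map (fun t => t.2)) = l.filter P := by
  intro l
  induction l with
  | nil => simp
  | cons b l ih =>
    have h := hf b
    cases hP : P b with
    | false =>
      rw [hP] at h; rw [if_neg (by simp)] at h
      rw [List.filterMap_cons_none h, List.filter_cons_of_neg (by simp [hP]), ih]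
    | true =>
      rw [hP] at h; rw [if_pos rfl] at h
      obtain ⟨t, ht, hsnd⟩ := h
      rw [List.filterMap_cons_some ht, List.filter_cons_of_pos hP]
      simp [ih, hsnd]

-- map of snd commutes with a filter that only looks at snd
theorem map_snd_filter_snd (P : String → Bool) :
    ∀ (E : List (Int × String)),
    (E.filter (fun t => P t.2)).map (fun t => t.2) = (E.map (fun t => t.2)).filter P := by
  intro E
  induction E with
  | nil => simp
  | cons t E ih =>
    cases h : P t.2 with
    | false => simp [h, ih]
    | true => simp [h, ih]

-- main equivalence
theorem main_equiv (codes_sorted : List String) (nqubits : Int) :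
    infer_basis_order_py codes_sorted nqubits = infer_basis_order_py_alt codes_sorted nqubits := by
  have hX : ("X" : String).toList = ['X'] := rfl
  have hY : ("Y" : String).toList = ['Y'] := rfl
  set n := nqubits with hn
  set D : List String := PySem.Set.ofList codes_sorted with hD
  set P : String → Bool := fun b => PySem.Set.contains (PySem.Set.ofList codes_sorted) b with hP
  set z : String := String.ofList (PySem.List.pyRepeat ['Z'] n) with hz
  set W1 : List String := sliding_window_bases ["X", "X"] n "Z" with hW1
  set W2 : List String := sliding_window_bases ["X", "Y"] n "Z" with hW2
  have hPiff : ∀ c, P c = true ↔ c ∈ D := by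
    intro c
    show PySem.Set.contains (PySem.Set.ofList codes_sorted) c = true ↔ c ∈ D
    rw [PySem.Set.contains_eq_listContains]
    exact List.contains_iff_mem
  -- character-level facts about the canonical codes
  have hzL : z.toList = List.replicate n.toNat 'Z' := z_toList n
  have hW1mem : ∀ b ∈ W1, ∃ k, b.toList
      = List.replicate k 'Z' ++ ['X', 'X'] ++ List.replicate (n.toNat - (k + 2)) 'Z' :=
    fun b hb => mem_of_mem_swb 'X' 'X' "X" "X" hX hX n b hb
  have hW2mem : ∀ b ∈ W2, ∃ k, b.toList
      = List.replicate k 'Z' ++ ['X', 'Y'] ++ List.replicate (n.toNat - (k + 2)) 'Z' :=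
    fun b hb => mem_of_mem_swb 'X' 'Y' "X" "Y" hX hY n b hb
  have hW1z : ∀ b ∈ W1, b ≠ z := by
    intro b hb heq
    obtain ⟨k, hk⟩ := hW1mem b hb
    have : 'X' ∈ b.toList := by rw [hk]; simp
    rw [heq, hzL] at this
    simp [List.mem_replicate] at this
  have hW2z : ∀ b ∈ W2, b ≠ z := by
    intro b hb heq
    obtain ⟨k, hk⟩ := hW2mem b hb
    have : 'X' ∈ b.toList := by rw [hk]; simp
    rw [heq, hzL] at this
    simp [List.mem_replicate] at this
  have hW2W1 : ∀ b ∈ W2, b ∉ W1 := by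
    intro b hb2 hb1
    obtain ⟨k, hk⟩ := hW2mem b hb2
    obtain ⟨l, hl⟩ := hW1mem b hb1
    have hYin : 'Y' ∈ b.toList := by rw [hk]; simp
    rw [hl] at hYin
    simp [List.mem_replicate] at hYin
  have hnd1 : W1.Nodup := swb_nodup 'X' 'X' (by decide) "X" "X" hX hX n
  have hnd2 : W2.Nodup := swb_nodup 'X' 'Y' (by decide) "X" "Y" hX hY n
  -- the canonical list and its properties
  set canon : List String := [z] ++ W1 ++ W2 with hcanon
  have hcanonnd : canon.Nodup := by
    rw [hcanon]
    have hform : ([z] ++ W1 ++ W2) = z :: (W1 ++ W2) := by simp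
    rw [hform]
    refine List.nodup_cons.mpr ⟨?_, ?_⟩
    · intro h
      rcases List.mem_append.mp h with h | h
      · exact hW1z z h rfl
      · exact hW2z z h rfl
    · exact List.Nodup.append hnd1 hnd2 (fun a ha hb => hW2W1 a hb ha)
  -- ======= A's side: the result is head ++ tail =======
  have hA : infer_basis_order_py codes_sorted n
      = canon.filter P ++ D.filter (fun c => !((canon.filter P).contains c)) := by
    show (let codes_set := PySem.Set.ofList codes_sorted; _) = _
    simp only [infer_basis_order_py, List.foldl_cons, List.foldl_nil, ← hP, ← hz, ← hW1, ← hW2,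
      List.nil_append]
    have h0 : (if P z = true then [z] else []) = [z].filter P := by
      cases hPz : P z <;> simp [List.filter, hPz]
    rw [h0]
    have hpre1 : ∀ b ∈ W1, b ∉ [z].filter P := by
      intro b hb hmem
      exact hW1z b hb (by simpa using List.mem_of_mem_filter hmem)
    have hpre2 : ∀ b ∈ W2, b ∉ [z].filter P ++ W1.filter P := by
      intro b hb hmem
      rcases List.mem_append.mp hmem with h | h
      · exact hW2z b hb (by simpa using List.mem_of_mem_filter h)
      · exact hW2W1 b hb (List.mem_of_mem_filter h)
    rw [loop_filter P W1 ([z].filter P) hnd1 hpre1,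
      loop_filter P W2 ([z].filter P ++ W1.filter P) hnd2 hpre2]
    rw [loop_update, PySem.Set.update_eq_append_filter]
    have hfc : canon.filter P = [z].filter P ++ W1.filter P ++ W2.filter P := by
      rw [hcanon, List.filter_append, List.filter_append]
    rw [← hfc, ← hD]
    simp only [PySem.Set.contains_eq_listContains]
  -- tail filter can test membership in canon instead of canon.filter P
  have htail : D.filter (fun c => !((canon.filter P).contains c))
      = D.filter (fun c => !(canon.contains c)) := by
    apply List.filter_congr
    intro c hc
    have hPc : P c = true := (hPiff c).mpr hc
    congr 1
    rw [Bool.eq_iff_iff, List.contains_iff_mem, List.contains_iff_mem, List.mem_filter]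
    simp [hPc]
  -- ======= B's side =======
  have hDnd : D.Nodup := by rw [hD]; exact PySem.Set.nodup_ofList codes_sorted
  have hB : infer_basis_order_py_alt codes_sorted n
      = canon.filter P ++ D.filter (fun c => !(canon.contains c)) := by
    show (let c0 := [z]; _) = _
    simp only [infer_basis_order_py_alt, List.foldl_cons, List.foldl_nil, ← hz, ← hW1, ← hW2]
    set rank : PySem.Dict String Int :=
      (PySem.List.enumerate ([z] ++ W1 ++ W2)).foldl (fun d p => d.insert p.2 p.1) PySem.Dict.empty with hrank
    set big : Int := (PySem.Dict.size rank : Int) with hbig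
    rw [PySem.List.dedup_eq_ofList, ← hD, ← hcanon] at *
    have hsndnd : (List.map (fun p => (p : Int × String).2) (PySem.List.enumerate canon)).Nodup := by
      rw [PySem.List.map_snd_enumerate]; exact hcanonnd
    -- rank's items and keys
    have hitems : rank.items = (PySem.List.enumerate canon).map (fun p => (p.2, p.1)) := by
      rw [hrank]
      rw [PySem.Dict.items_foldl_insert_fresh (PySem.List.enumerate canon)
        (fun p => p.2) (fun p => p.1) PySem.Dict.empty
        (by intro a _; simp [PySem.Dict.contains_empty]) hsndnd]
      have hemp : (PySem.Dict.empty : PySem.Dict String Int).items = [] := rfl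
      simp [hemp]
    have hkeys : rank.keys = canon := by
      show rank.items.map (fun p => p.1) = canon
      rw [hitems, List.map_map]
      exact PySem.List.map_snd_enumerate canon 0
    have hkeysnd : rank.keys.Nodup := by rw [hkeys]; exact hcanonnd
    have hbigval : big = (canon.length : Int) := by
      have hsz : rank.size = rank.items.length := rfl
      rw [hbig, hsz, hitems]
      simp
    have hrk_mem : ∀ (i : Int) (b : String), (i, b) ∈ PySem.List.enumerate canon →
        rank.getD b big = i := by
      intro i b hib
      apply PySem.Dict.getD_of_mem_items rank _ hkeysnd
      rw [hitems]
      exact List.mem_map.mpr ⟨(i, b), hib, rfl⟩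
    have hrk_not : ∀ b : String, b ∉ canon → rank.getD b big = big := by
      intro b hb
      apply PySem.Dict.getD_of_not_contains
      rw [PySem.Dict.contains_eq_decide_mem_keys, hkeys]
      simp [hb]
    have hrk_lt : ∀ (i : Int) (b : String), (i, b) ∈ PySem.List.enumerate canon → i < big := by
      intro i b hib
      obtain ⟨k, hk, heq⟩ := (PySem.List.mem_enumerate_iff _ _ _).mp hib
      rw [hbigval]
      have : i = (k : Int) := by simpa using congrArg Prod.fst heq
      omega
    -- the decorated pairs
    set E := PySem.List.enumerate D with hE
    have hEsnd : E.map (fun t => t.2) = D := PySem.List.map_snd_enumerate D 0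
    have hEndsnd : (E.map (fun t => t.2)).Nodup := by rw [hEsnd]; exact hDnd
    set f : String → Option (Int × String) := fun b => E.find? (fun t => t.2 == b) with hf
    have hsndD : ∀ t, t ∈ E → t.2 ∈ D := by
      intro t ht
      rw [← hEsnd]
      exact List.mem_map.mpr ⟨t, ht, rfl⟩
    have hfspec : ∀ b, if P b = true then (∃ t, f b = some t ∧ t.2 = b ∧ t ∈ E) else f b = none := by
      intro b
      cases hPb : P b with
      | true =>
        rw [if_pos rfl]
        have hbD : b ∈ D := (hPiff b).mp hPb
        obtain ⟨k, hk, hkb⟩ := List.getElem_of_mem hbD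
        have htE : ((k : Int), b) ∈ E := by
          rw [hE]
          exact (PySem.List.mem_enumerate_iff _ _ _).mpr ⟨k, hk, by simp [hkb]⟩
        have hsome : (E.find? (fun t => t.2 == b)).isSome := by
          rw [List.find?_isSome]
          exact ⟨((k : Int), b), htE, by simp⟩
        obtain ⟨t', ht'⟩ := Option.isSome_iff_exists.mp hsome
        exact ⟨t', ht', by simpa using List.find?_some ht', List.mem_of_find?_eq_some ht'⟩
      | false =>
        rw [if_neg (by simp)]
        rw [hf, List.find?_eq_none]
        intro t ht
        simp only [beq_iff_eq]
        intro hb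
        have hmem : t.2 ∈ D := hsndD t ht
        rw [hb] at hmem
        rw [(hPiff b).mpr hmem] at hPb
        cases hPb
    have hfspec' : ∀ b, if P b then (∃ t, f b = some t ∧ t.2 = b) else f b = none := by
      intro b
      cases hPb : P b with
      | true =>
        rw [if_pos rfl]
        have := hfspec b
        rw [hPb, if_pos rfl] at this
        obtain ⟨t, h1, h2, _⟩ := this
        exact ⟨t, h1, h2⟩
      | false =>
        rw [if_neg (by simp)]
        have := hfspec b
        rw [hPb, if_neg (by simp)] at this
        exact this
    have hf_of_P : ∀ b x, f b = some x → P b = true ∧ x.2 = b ∧ x ∈ E := by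
      intro b x hx
      have hsp := hfspec b
      cases hPb : P b with
      | false =>
        rw [hPb, if_neg (by simp)] at hsp
        rw [hsp] at hx
        cases hx
      | true =>
        rw [hPb, if_pos rfl] at hsp
        obtain ⟨t, h1, h2, h3⟩ := hsp
        rw [h1] at hx
        cases hx
        exact ⟨rfl, h2, h3⟩
    set headp : List (Int × String) := canon.filterMap f with hheadp
    set tailp : List (Int × String) := E.filter (fun t => !(canon.contains t.2)) with htailp
    -- membership of headp
    have hmem_headp : ∀ t, t ∈ headp ↔ t ∈ E ∧ canon.contains t.2 = true := by
      intro t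
      constructor
      · intro ht
        obtain ⟨b, hb, hfb⟩ := List.mem_filterMap.mp ht
        obtain ⟨_, h2, h3⟩ := hf_of_P b t hfb
        exact ⟨h3, List.contains_iff_mem.mpr (h2 ▸ hb)⟩
      · rintro ⟨htE, htc⟩
        have hbc : t.2 ∈ canon := List.contains_iff_mem.mp htc
        have hPt : P t.2 = true := (hPiff t.2).mpr (hsndD t htE)
        have hsp := hfspec t.2
        rw [hPt, if_pos rfl] at hsp
        obtain ⟨t', h1, h2, h3⟩ := hsp
        have heq : t' = t := List.inj_on_of_nodup_map hEndsnd h3 htE h2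
        rw [heq] at h1
        exact List.mem_filterMap.mpr ⟨t.2, hbc, h1⟩
    -- headp is nodup
    have hmapsnd : (headp.map (fun t => t.2)) = canon.filter P :=
      filterMap_map_snd f P hfspec' canon
    have hheadnd : headp.Nodup := by
      have : (headp.map (fun t => t.2)).Nodup := by
        rw [hmapsnd]; exact hcanonnd.filter P
      exact this.of_map
    -- the permutation
    have hperm : (headp ++ tailp).Perm E := by
      have h1 : (E.filter (fun t => canon.contains t.2) ++ tailp).Perm E := by
        rw [htailp]
        exact List.filter_append_perm _ E
      refine List.Perm.trans (List.Perm.append_right tailp ?_) h1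
      apply (List.perm_ext_iff_of_nodup hheadnd ((hEndsnd.of_map).filter _)).mpr
      intro t
      rw [hmem_headp t, List.mem_filter]
    -- pairwise strictly increasing lexicographic key
    set key : (Int × String) → Lex (Int × Int) := fun t => toLex (rank.getD t.2 big, t.1) with hkey
    have hEpw : E.Pairwise (fun p q => p.1 < q.1) := PySem.List.pairwise_lt_enumerate D 0
    have hrank_of_mem : ∀ b ∈ canon, ∃ i : Int, ((i, b) ∈ PySem.List.enumerate canon ∧
        rank.getD b big = i ∧ i < big) := by
      intro b hb
      obtain ⟨k, hk, hkb⟩ := List.getElem_of_mem hb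
      have hm : ((k : Int), b) ∈ PySem.List.enumerate canon :=
        (PySem.List.mem_enumerate_iff _ _ _).mpr ⟨k, hk, by simp [hkb]⟩
      exact ⟨(k : Int), hm, hrk_mem _ _ hm, hrk_lt _ _ hm⟩
    have hpw : (headp ++ tailp).Pairwise (fun a b => key a < key b) := by
      rw [List.pairwise_append]
      refine ⟨?_, ?_, ?_⟩
      · -- within headp: ranks follow canon's enumeration
        rw [hheadp, List.pairwise_filterMap]
        have hcpw : canon.Pairwise (fun b b' => ∀ (i : Int), (i, b) ∈ PySem.List.enumerate canon →
            ∀ (j : Int), (j, b') ∈ PySem.List.enumerate canon → i < j) := by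
          rw [List.pairwise_iff_getElem]
          intro a c ha hc hac i hip j hjq
          obtain ⟨k, hk, hkeq⟩ := (PySem.List.mem_enumerate_iff _ _ _).mp hip
          obtain ⟨l, hl, hleq⟩ := (PySem.List.mem_enumerate_iff _ _ _).mp hjq
          have h1 : i = (k : Int) := by simpa using congrArg Prod.fst hkeq
          have h2 : canon[a] = canon[k] := by simpa using congrArg Prod.snd hkeq
          have h3 : j = (l : Int) := by simpa using congrArg Prod.fst hleq
          have h4 : canon[c] = canon[l] := by simpa using congrArg Prod.snd hleq
          have hka : k = a := ((List.Nodup.getElem_inj_iff hcanonnd).mp h2.symm)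
          have hlc : l = c := ((List.Nodup.getElem_inj_iff hcanonnd).mp h4.symm)
          omega
        refine hcpw.imp_of_mem ?_
        intro b b' hb hb' hR x hx y hy
        obtain ⟨_, hxb, _⟩ := hf_of_P b x hx
        obtain ⟨_, hyb, _⟩ := hf_of_P b' y hy
        obtain ⟨i, hmi, hgi, _⟩ := hrank_of_mem b hb
        obtain ⟨j, hmj, hgj, _⟩ := hrank_of_mem b' hb'
        have hij : i < j := hR _ hmi _ hmj
        rw [hkey]
        simp only [Prod.Lex.lt_iff, ofLex_toLex]
        left
        rw [hxb, hyb, hgi, hgj]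
        exact hij
      · -- within tailp: ranks are all big, enumerate indices increase
        have hpwf : tailp.Pairwise (fun p q => p.1 < q.1) := hEpw.filter _
        refine hpwf.imp_of_mem ?_
        intro p q hp hq hlt
        have hpnc : p.2 ∉ canon := by
          have := (List.mem_filter.mp hp).2
          intro hmem
          rw [List.contains_iff_mem.mpr hmem] at this
          cases this
        have hqnc : q.2 ∉ canon := by
          have := (List.mem_filter.mp hq).2
          intro hmem
          rw [List.contains_iff_mem.mpr hmem] at this
          cases this
        rw [hkey]
        simp only [Prod.Lex.lt_iff, ofLex_toLex]
        right
        rw [hrk_not _ hpnc, hrk_not _ hqnc]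
        exact ⟨rfl, hlt⟩
      · -- head before tail
        intro x hx y hy
        obtain ⟨b, hb, hfb⟩ := List.mem_filterMap.mp hx
        obtain ⟨_, hxb, _⟩ := hf_of_P b x hfb
        obtain ⟨i, hmi, hgi, hilt⟩ := hrank_of_mem b hb
        have hync : y.2 ∉ canon := by
          have := (List.mem_filter.mp hy).2
          intro hmem
          rw [List.contains_iff_mem.mpr hmem] at this
          cases this
        rw [hkey]
        simp only [Prod.Lex.lt_iff, ofLex_toLex]
        left
        rw [hxb, hgi, hrk_not _ hync]
        exact hilt
    -- the sort evaluates to headp ++ tailp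
    have hsort : PySem.List.sorted2 E (fun t => rank.getD t.2 big) (fun t => t.1) false
        = headp ++ tailp := by
      rw [sorted2_eq_sorted_lex E (fun t => rank.getD t.2 big) (fun t => t.1)]
      exact PySem.List.sorted_eq_of_perm_of_pairwise_lt E (headp ++ tailp) key hperm hpw
    rw [hsort, List.map_append, hmapsnd]
    congr 1
    rw [htailp, map_snd_filter_snd (fun c => !(canon.contains c)) E, hEsnd]
  rw [hA, htail, hB]

-- ===== VERDICT (by name: the statement is the Claim_ definition above) =====
theorem infer_basis_order_py_spec : Claim_equal_infer_basis_order_py := by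
  intro codes_sorted nqubits _
  unfold Spec_infer_basis_order_py
  exact main_equiv codes_sorted nqubits
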